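-- pv_equiv track=rewrite | github.com/RumyantS97/MSDT | msdt-1/source_file_2.py | string_processing
-- ===== SOURCE A (Python) =====
-- def string_processing(s):
--    res = ""
--    for i in range(57, 47, -1):
--        if s.find(chr(i)) != -1:
--            res += chr(i)
--    if res == "":
--        res = "-1"
--    return res
-- ===== SOURCE B (Python) =====
-- def string_processing(s):
--     digits = set(s) & set("0123456789")
--     return "".join(sorted(digits, reverse=True)) if digits else "-1"
-- ===== Notes on version B (the rewrite author's own statement) =====
-- stated objective: simpler
-- what changed: A scans the whole string once per digit (ten s.find calls in descending digit order); B makes a single pass collecting the digit characters as a set intersection and then sorts them descending.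
import Mathlib
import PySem

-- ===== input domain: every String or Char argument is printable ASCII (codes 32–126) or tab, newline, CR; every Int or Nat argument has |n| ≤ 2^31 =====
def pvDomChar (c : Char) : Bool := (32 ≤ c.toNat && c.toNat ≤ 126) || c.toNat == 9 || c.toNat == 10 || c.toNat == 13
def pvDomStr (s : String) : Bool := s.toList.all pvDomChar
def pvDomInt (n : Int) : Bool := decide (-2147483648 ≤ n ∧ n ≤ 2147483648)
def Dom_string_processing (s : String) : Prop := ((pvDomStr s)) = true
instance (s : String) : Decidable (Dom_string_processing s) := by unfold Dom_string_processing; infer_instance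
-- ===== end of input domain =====

-- B replaces A's ten per-digit full-string .find scans with one collecting pass
-- (set intersection with the digit set) followed by a descending sort: simpler.

-- ===== PORT A =====
def string_processing (s : String) : String :=
  let res := (PySem.List.pyRange 57 47 (-1)).foldl
    (fun res i =>
      if PySem.Str.find s (String.ofList [Char.ofNat i.toNat]) ≠ -1 then
        res ++ String.ofList [Char.ofNat i.toNat]
      else res) ""
  if res = "" then "-1" else res

-- ===== PORT B =====
def string_processing_alt (s : String) : String :=
  let digits := PySem.Set.inter (PySem.Set.ofList s.toList) (PySem.Set.ofList "0123456789".toList)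
  if digits = [] then "-1"
  else String.ofList (PySem.List.sorted digits (fun c => c) true)

-- ===== PRECONDITION & SPEC =====
def Spec_string_processing (s : String) (out : String) : Prop := out = string_processing_alt s
instance (s : String) (out : String) : Decidable (Spec_string_processing s out) := by unfold Spec_string_processing; infer_instance

-- ===== CLAIM (what is proved, stated in full; the proofs are below) =====
def Claim_equal_string_processing : Prop := ∀ (s : String), Dom_string_processing s → Spec_string_processing s (string_processing s)

-- ===== LEMMAS AND PROOFS =====

-- the ten digit characters in descending order
def pvDigits : List Char := ['9','8','7','6','5','4','3','2','1','0']

-- the canonical result list: descending digits that occur in s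
def pvL (s : String) : List Char := pvDigits.filter (fun c => decide (c ∈ s.toList))

theorem pv_singleton_infix_iff {α : Type} (a : α) (l : List α) :
    [a] <:+: l ↔ a ∈ l := by
  constructor
  · intro h; exact h.subset (List.mem_singleton_self a)
  · intro h
    obtain ⟨u, v, rfl⟩ := List.append_of_mem h
    exact ⟨u, v, by simp⟩

theorem pv_condA (s : String) (c : Char) :
    (PySem.Str.find s (String.ofList [c]) ≠ -1) ↔ c ∈ s.toList := by
  rw [PySem.Str.find_eq]
  simp only [String.toList_ofList]
  rw [PySem.Chars.find_ne_neg_one_iff, pv_singleton_infix_iff]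

theorem pv_foldA (s : String) : ∀ (cs : List Int) (acc : String),
    cs.foldl (fun res i =>
      if PySem.Str.find s (String.ofList [Char.ofNat i.toNat]) ≠ -1 then
        res ++ String.ofList [Char.ofNat i.toNat]
      else res) acc
    = acc ++ String.ofList ((cs.map (fun i => Char.ofNat i.toNat)).filter
        (fun c => decide (c ∈ s.toList)))
  | [], acc => by simp
  | i :: cs, acc => by
    simp only [List.foldl_cons, List.map_cons, List.filter_cons]
    by_cases h : Char.ofNat i.toNat ∈ s.toList
    · rw [if_pos ((pv_condA s _).mpr h)]
      simp only [h, decide_true, pv_foldA s cs]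
      rw [String.append_assoc, ← String.ofList_append]
      rfl
    · rw [if_neg (fun hc => h ((pv_condA s _).mp hc))]
      simp only [h, decide_false, pv_foldA s cs]
      simp

theorem pv_A_eq (s : String) :
    string_processing s = if pvL s = [] then "-1" else String.ofList (pvL s) := by
  unfold string_processing
  have h1 : PySem.List.pyRange 57 47 (-1) = [57,56,55,54,53,52,51,50,49,48] := by decide
  rw [h1, pv_foldA s]
  have h2 : (([57,56,55,54,53,52,51,50,49,48] : List Int).map
      (fun i => Char.ofNat i.toNat)) = pvDigits := by decide
  rw [h2]
  show (if ("" : String) ++ String.ofList (pvL s) = "" then "-1"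
        else "" ++ String.ofList (pvL s)) = _
  simp only [String.empty_append]
  by_cases h : pvL s = []
  · simp [h]
  · rw [if_neg (by simpa using h), if_neg h]

theorem pv_mem_digits_iff (c : Char) : c ∈ "0123456789".toList ↔ c ∈ pvDigits := by
  simp [pvDigits]; tauto

theorem pv_mem_inter (s : String) (c : Char) :
    c ∈ PySem.Set.inter (PySem.Set.ofList s.toList) (PySem.Set.ofList "0123456789".toList)
      ↔ c ∈ pvL s := by
  rw [PySem.Set.mem_inter]
  simp only [PySem.Set.mem_ofList, pvL, List.mem_filter, decide_eq_true_eq]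
  rw [pv_mem_digits_iff]; tauto

theorem pv_B_eq (s : String) :
    string_processing_alt s = if pvL s = [] then "-1" else String.ofList (pvL s) := by
  unfold string_processing_alt
  set dg := PySem.Set.inter (PySem.Set.ofList s.toList) (PySem.Set.ofList "0123456789".toList) with hdg
  have hnil : dg = [] ↔ pvL s = [] := by
    simp only [List.eq_nil_iff_forall_not_mem]
    constructor <;> intro h c hc
    · exact h c ((pv_mem_inter s c).mpr hc)
    · exact h c ((pv_mem_inter s c).mp hc)
  by_cases h : pvL s = []
  · rw [if_pos (hnil.mpr h), h]; simp
  · rw [if_neg (fun hc => h (hnil.mp hc)), if_neg h]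
    congr 1
    apply PySem.List.sorted_rev_eq_of_perm_of_pairwise_gt
    · -- pvL s is a permutation of dg
      have hnd : dg.Nodup := PySem.Set.nodup_inter _ _ (PySem.Set.nodup_ofList _)
      have hnl : (pvL s).Nodup := List.Nodup.filter _ (by decide)
      exact (List.perm_ext_iff_of_nodup hnl hnd).mpr
        (fun c => by rw [pv_mem_inter s c])
    · -- pvL s is strictly decreasing
      exact List.Pairwise.filter _ (by decide : pvDigits.Pairwise (fun a b => a > b))

-- ===== VERDICT (by name: the statement is the Claim_ definition above) =====
theorem string_processing_spec : Claim_equal_string_processing := by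
  intro s _
  unfold Spec_string_processing
  rw [pv_A_eq, pv_B_eq]
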